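-- pv_equiv track=rewrite | github.com/Tinczo/python-stdin | filter_sentences_with_connectors.py | count_specific_words
-- ===== SOURCE A (Python) =====
-- def count_specific_words(sentence, target_words):
--     """
--     Liczy wystąpienia określonych wyrazów w zdaniu.
--     """
--     count = 0
--     words = []
--     word = ""
--
--     for char in sentence:
--         if char in ' \t\n\r\f\v.,!?:;()[]{}':
--             if word:
--                 words.append(word.lower())
--                 word = ""
--         else:
--             word += char
--
--     if word:
--         words.append(word.lower())
--
--     # Zliczamy wystąpienia docelowych wyrazów
--     for word in words:
--         if word in target_words:
--             count += 1
--
--     return count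
-- ===== SOURCE B (Python) =====
-- DELIMS = ' \t\n\r\f\v.,!?:;()[]{}'
--
-- def count_specific_words(sentence, target_words):
--     """
--     Liczy wystąpienia określonych wyrazów w zdaniu.
--     """
--     count = 0
--     n = len(sentence)
--     i = 0
--     while i < n:
--         if sentence[i] in DELIMS:
--             i += 1
--             continue
--         j = i
--         while j < n and sentence[j] not in DELIMS:
--             j += 1
--         if sentence[i:j].lower() in target_words:
--             count += 1
--         i = j
--     return count
-- ===== Notes on version B (the rewrite author's own statement) =====
-- stated objective: alternative
-- what changed: A accumulates characters into words, materialises the full list of lowered words, and then re-scans that list to count; B is a two-pointer index scan that finds each maximal non-delimiter run in place, lowers only that slice, and counts hits on the fly without building any word list.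
import Mathlib
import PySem

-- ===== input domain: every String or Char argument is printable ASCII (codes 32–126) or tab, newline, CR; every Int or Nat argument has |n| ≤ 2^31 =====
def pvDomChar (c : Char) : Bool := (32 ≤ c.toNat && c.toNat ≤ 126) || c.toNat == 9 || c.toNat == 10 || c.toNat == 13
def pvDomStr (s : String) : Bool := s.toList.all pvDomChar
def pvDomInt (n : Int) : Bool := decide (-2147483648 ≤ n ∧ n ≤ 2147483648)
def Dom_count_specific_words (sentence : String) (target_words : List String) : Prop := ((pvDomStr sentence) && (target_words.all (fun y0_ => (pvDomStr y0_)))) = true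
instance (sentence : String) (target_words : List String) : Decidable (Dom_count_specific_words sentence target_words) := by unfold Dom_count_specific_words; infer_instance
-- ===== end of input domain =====

-- B replaces A's char-accumulator pass (which materialises a list of lowered words and then
-- re-scans it) with a two-pointer index scan that counts each maximal non-delimiter run on the fly
-- (objective: alternative).

-- ===== PORT A =====
-- the delimiter test `char in ' \t\n\r\f\v.,!?:;()[]{}'` (char is a single char, so membership)
def pvDelim (c : Char) : Bool := ("\x20\t\n\r\x0c\x0b.,!?:;()[]{}".toList).contains c

def count_specific_words (sentence : String) (target_words : List String) : Int :=
  let st := sentence.toList.foldl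
    (fun (st : List String × List Char) c =>
      if pvDelim c then
        if !st.2.isEmpty then (st.1 ++ [String.ofList (PySem.Chars.lower st.2)], ([] : List Char)) else st
      else (st.1, st.2 ++ [c]))
    ([], [])
  let words := if !st.2.isEmpty then st.1 ++ [String.ofList (PySem.Chars.lower st.2)] else st.1
  words.foldl (fun count w => if target_words.contains w then count + 1 else count) 0

-- ===== PORT B =====
-- inner `while j < n and sentence[j] not in DELIMS: j += 1` (fuel only makes the loop total;
-- it never runs out: each step increases j and stops at j = n)
def pvFindEnd : Nat → List Char → Nat → Nat
  | 0, _, j => j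
  | fuel + 1, s, j =>
    if j < s.length && !pvDelim (s.getD j ' ') then pvFindEnd fuel s (j + 1) else j

-- outer `while i < n` loop (same fuel scheme); the slice sentence[i:j] with 0 ≤ i ≤ j ≤ n is
-- exactly (s.drop i).take (j - i)
def pvAltLoop : Nat → List Char → List String → Nat → Int → Int
  | 0, _, _, _, count => count
  | fuel + 1, s, tws, i, count =>
    if i < s.length then
      if pvDelim (s.getD i ' ') then
        pvAltLoop fuel s tws (i + 1) count
      else
        let j := pvFindEnd (s.length + 1) s i
        let count' := if tws.contains (String.ofList (PySem.Chars.lower ((s.drop i).take (j - i)))) then count + 1 else count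
        pvAltLoop fuel s tws j count'
    else count

def count_specific_words_alt (sentence : String) (target_words : List String) : Int :=
  pvAltLoop (sentence.toList.length + 1) sentence.toList target_words 0 0

-- ===== PRECONDITION & SPEC =====
def Spec_count_specific_words (sentence : String) (target_words : List String) (out : Int) : Prop := out = count_specific_words_alt sentence target_words
instance (sentence : String) (target_words : List String) (out : Int) : Decidable (Spec_count_specific_words sentence target_words out) := by unfold Spec_count_specific_words; infer_instance

-- ===== CLAIM (what is proved, stated in full; the proofs are below) =====
def Claim_equal_count_specific_words : Prop := ∀ (sentence : String) (target_words : List String), Dom_count_specific_words sentence target_words → Spec_count_specific_words sentence target_words (count_specific_words sentence target_words)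

-- ===== LEMMAS AND PROOFS =====

-- non-delimiter test
def pvND (c : Char) : Bool := !pvDelim c

-- specification tokenizer: the maximal non-delimiter runs of cs, in order
def pvTokens : List Char → List (List Char)
  | [] => []
  | c :: cs =>
    if h : pvDelim c then pvTokens cs
    else ((c :: cs).takeWhile pvND) :: pvTokens ((c :: cs).drop ((c :: cs).takeWhile pvND).length)
termination_by cs => cs.length
decreasing_by
  · simp
  · have hnd : pvND c = true := by
      simp only [pvND, Bool.not_eq_true']
      exact eq_false_of_ne_true h
    rw [List.takeWhile_cons_of_pos hnd]
    simp only [List.length_drop, List.length_cons]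
    omega

theorem pvTokens_nil : pvTokens [] = [] := by simp [pvTokens]

theorem pvTokens_delim (c : Char) (cs : List Char) (hc : pvDelim c = true) :
    pvTokens (c :: cs) = pvTokens cs := by
  rw [pvTokens]; rw [dif_pos hc]

theorem pvTokens_nondelim (c : Char) (cs : List Char) (hc : pvDelim c = false) :
    pvTokens (c :: cs) =
      ((c :: cs).takeWhile pvND) :: pvTokens ((c :: cs).drop ((c :: cs).takeWhile pvND).length) := by
  rw [pvTokens]; rw [dif_neg (by simp [hc])]

theorem pvTakeLenTakeWhile {α : Type} (p : α → Bool) (l : List α) :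
    l.take ((l.takeWhile p).length) = l.takeWhile p := by
  induction l with
  | nil => rfl
  | cons c cs ih => cases hp : p c <;> simp [hp, ih]

-- ---- B side ----

theorem pvFindEnd_spec (s : List Char) :
    ∀ (fuel j : Nat), s.length - j < fuel →
      pvFindEnd fuel s j = j + ((s.drop j).takeWhile pvND).length := by
  intro fuel
  induction fuel with
  | zero => intro j hj; omega
  | succ fuel ih =>
    intro x hx
    rw [pvFindEnd]
    by_cases h : (decide (x < s.length) && !pvDelim (s.getD x ' ')) = true
    · obtain ⟨h1, h2⟩ : x < s.length ∧ pvDelim (s.getD x ' ') = false := by simpa using h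
      rw [if_pos h, ih (x + 1) (by omega)]
      have hget : s.getD x ' ' = s[x] := List.getD_eq_getElem s ' ' h1
      have h2' : pvDelim s[x] = false := by rw [← hget]; exact h2
      have hdrop : s.drop x = s[x] :: s.drop (x + 1) := List.drop_eq_getElem_cons h1
      rw [hdrop, List.takeWhile_cons_of_pos (by simp only [pvND, h2', Bool.not_false])]
      simp only [List.length_cons]
      omega
    · rw [if_neg h]
      simp only [Bool.and_eq_true, decide_eq_true_eq, Bool.not_eq_true', not_and] at h
      by_cases hlt : x < s.length
      · have hget : s.getD x ' ' = s[x] := List.getD_eq_getElem s ' ' hlt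
        have hdrop : s.drop x = s[x] :: s.drop (x + 1) := List.drop_eq_getElem_cons hlt
        have hdl : pvDelim s[x] = true := by
          have h3 := h hlt
          rw [hget] at h3
          cases hpd : pvDelim s[x] with
          | true => rfl
          | false => exact absurd hpd h3
        rw [hdrop, List.takeWhile_cons_of_neg (by simp only [pvND, hdl, Bool.not_true]; simp)]
        simp
      · rw [List.drop_eq_nil_of_le (by omega)]; simp

theorem pvAltLoop_spec (s : List Char) (tws : List String) :
    ∀ (fuel i : Nat) (count : Int), s.length - i < fuel →
      pvAltLoop fuel s tws i count =
        count + ((pvTokens (s.drop i)).countP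
          (fun t => tws.contains (String.ofList (PySem.Chars.lower t))) : Int) := by
  intro fuel
  induction fuel with
  | zero => intro i count hk; omega
  | succ fuel ih =>
    intro i count hk
    rw [pvAltLoop]
    by_cases h : i < s.length
    · have hget : s.getD i ' ' = s[i] := List.getD_eq_getElem s ' ' h
      have hdrop : s.drop i = s[i] :: s.drop (i + 1) := List.drop_eq_getElem_cons h
      rw [if_pos h]
      cases hd : pvDelim (s.getD i ' ') with
      | true =>
        rw [if_pos (by rfl)]
        rw [ih (i + 1) count (by omega)]
        have hd' : pvDelim s[i] = true := by rw [← hget]; exact hd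
        rw [hdrop, pvTokens_delim _ _ hd']
      | false =>
        have hd' : pvDelim s[i] = false := by rw [← hget]; exact hd
        rw [if_neg (by simp)]
        dsimp only
        have hnd : pvND s[i] = true := by simp only [pvND, hd', Bool.not_false]
        have hfe : pvFindEnd (s.length + 1) s i = i + ((s.drop i).takeWhile pvND).length :=
          pvFindEnd_spec s (s.length + 1) i (by omega)
        have htw : (s.drop i).takeWhile pvND = s[i] :: (s.drop (i + 1)).takeWhile pvND := by
          rw [hdrop, List.takeWhile_cons_of_pos hnd]
        have hlen1 : 1 ≤ ((s.drop i).takeWhile pvND).length := by rw [htw]; simp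
        have htok : (s.drop i).take (pvFindEnd (s.length + 1) s i - i) = (s.drop i).takeWhile pvND := by
          rw [hfe]
          have hh : i + ((s.drop i).takeWhile pvND).length - i = ((s.drop i).takeWhile pvND).length := by omega
          rw [hh, pvTakeLenTakeWhile]
        have hrest : (s.drop i).drop (((s.drop i).takeWhile pvND).length) = s.drop (pvFindEnd (s.length + 1) s i) := by
          rw [List.drop_drop, hfe, Nat.add_comm]
        have htoks : pvTokens (s.drop i) =
            ((s.drop i).takeWhile pvND) :: pvTokens (s.drop (pvFindEnd (s.length + 1) s i)) := by
          conv_lhs => rw [hdrop]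
          rw [pvTokens_nondelim _ _ hd', ← hdrop, hrest]
        rw [ih (pvFindEnd (s.length + 1) s i) _ (by rw [hfe]; omega)]
        rw [htoks, List.countP_cons, htok]
        cases hhit : tws.contains (String.ofList (PySem.Chars.lower ((s.drop i).takeWhile pvND))) with
        | true => simp only [if_true]; push_cast; ring
        | false => simp
    · rw [if_neg h]
      rw [List.drop_eq_nil_of_le (by omega), pvTokens_nil]
      simp

theorem pvB_eq (s : String) (tws : List String) :
    count_specific_words_alt s tws =
      ((pvTokens s.toList).countP
        (fun t => tws.contains (String.ofList (PySem.Chars.lower t))) : Int) := by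
  unfold count_specific_words_alt
  rw [pvAltLoop_spec s.toList tws (s.toList.length + 1) 0 0 (by omega)]
  simp

-- ---- A side ----

def pvStep (st : List String × List Char) (c : Char) : List String × List Char :=
  if pvDelim c then
    if !st.2.isEmpty then (st.1 ++ [String.ofList (PySem.Chars.lower st.2)], ([] : List Char)) else st
  else (st.1, st.2 ++ [c])

def pvFinal (st : List String × List Char) : List String :=
  if !st.2.isEmpty then st.1 ++ [String.ofList (PySem.Chars.lower st.2)] else st.1

-- A's fold with a pending word w: the words it will still emit
def pvTokensP : List Char → List Char → List (List Char)
  | w, [] => if w.isEmpty then [] else [w]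
  | w, c :: cs =>
    if pvDelim c then (if w.isEmpty then [] else [w]) ++ pvTokensP [] cs
    else pvTokensP (w ++ [c]) cs

theorem pvFoldA_spec (cs : List Char) :
    ∀ (ws : List String) (w : List Char),
      pvFinal (cs.foldl pvStep (ws, w)) =
        ws ++ (pvTokensP w cs).map (fun t => String.ofList (PySem.Chars.lower t)) := by
  induction cs with
  | nil =>
    intro ws w
    cases hw : w.isEmpty <;> simp [pvFinal, pvTokensP, hw]
  | cons c cs ih =>
    intro ws w
    rw [List.foldl_cons]
    cases hc : pvDelim c with
    | true =>
      cases hw : w.isEmpty with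
      | true =>
        obtain rfl : w = [] := List.isEmpty_iff.mp hw
        have hstep : pvStep (ws, ([] : List Char)) c = (ws, []) := by simp [pvStep, hc]
        rw [hstep, ih ws []]
        simp [pvTokensP, hc]
      | false =>
        have hstep : pvStep (ws, w) c =
            (ws ++ [String.ofList (PySem.Chars.lower w)], ([] : List Char)) := by
          simp [pvStep, hc, hw]
        rw [hstep, ih]
        simp [pvTokensP, hc, hw]
    | false =>
      have hstep : pvStep (ws, w) c = (ws, w ++ [c]) := by simp [pvStep, hc]
      rw [hstep, ih]
      simp [pvTokensP, hc]

theorem pvTokensP_eq (cs : List Char) :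
    ∀ (w : List Char),
      pvTokensP w cs =
        if w.isEmpty then pvTokens cs
        else (w ++ cs.takeWhile pvND) :: pvTokens (cs.drop ((cs.takeWhile pvND).length)) := by
  induction cs with
  | nil =>
    intro w
    cases hw : w.isEmpty <;> simp [pvTokensP, pvTokens_nil, hw]
  | cons c cs ih =>
    intro w
    cases hc : pvDelim c with
    | true =>
      have hnd : ¬ pvND c = true := by simp [pvND, hc]
      have h0 : pvTokensP w (c :: cs) = (if w.isEmpty then [] else [w]) ++ pvTokensP [] cs := by
        simp [pvTokensP, hc]
      have ihnil : pvTokensP ([] : List Char) cs = pvTokens cs := by rw [ih []]; simp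
      rw [h0, ihnil]
      cases hw : w.isEmpty <;>
        simp [List.takeWhile_cons_of_neg hnd, pvTokens_delim c cs hc]
    | false =>
      have hnd : pvND c = true := by simp [pvND, hc]
      have h0 : pvTokensP w (c :: cs) = pvTokensP (w ++ [c]) cs := by simp [pvTokensP, hc]
      rw [h0, ih (w ++ [c]), if_neg (by simp)]
      cases hw : w.isEmpty with
      | true =>
        obtain rfl : w = [] := List.isEmpty_iff.mp hw
        rw [if_pos rfl]
        rw [pvTokens_nondelim c cs hc, List.takeWhile_cons_of_pos hnd]
        simp [List.drop_succ_cons]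
      | false =>
        rw [if_neg (by simp)]
        rw [List.takeWhile_cons_of_pos hnd]
        simp [List.append_assoc, List.drop_succ_cons]

theorem pvA_eq (s : String) (tws : List String) :
    count_specific_words s tws =
      ((pvTokens s.toList).countP
        (fun t => tws.contains (String.ofList (PySem.Chars.lower t))) : Int) := by
  show (pvFinal (s.toList.foldl pvStep ([], []))).foldl
      (fun count w => if tws.contains w then count + 1 else count) 0 = _
  rw [pvFoldA_spec s.toList [] []]
  rw [PySem.List.foldl_if_add_one]
  rw [pvTokensP_eq s.toList []]
  simp [List.countP_map, Function.comp_def]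

-- ===== VERDICT (by name: the statement is the Claim_ definition above) =====
theorem count_specific_words_spec : Claim_equal_count_specific_words := by
  intro s tws _
  unfold Spec_count_specific_words
  rw [pvA_eq, pvB_eq]
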